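-- pv_equiv track=rewrite | github.com/DICKY1987/complete-ai-development-pipeline-canonical-phase-plan | tools/normalize_phase_readmes.py | parse_readme_sections
-- ===== SOURCE A (Python) =====
-- from typing import Dict, List, Tuple
--
-- def parse_readme_sections(content: str) -> Tuple[str, Dict[str, str], str]:
--     """
--     Parse a README.md into:
--     - title: first level-1 heading line (e.g. "# Phase 3 – ...")
--     - sections: mapping from section name (without "## ") to body text
--     - leading_text: any text before the first "##" heading (used to extract Purpose)
--     """
--     lines = content.splitlines()
--     title = ""
--     sections: Dict[str, str] = {}
--     leading_lines: List[str] = []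
--
--     current_section_name = None
--     current_buf: List[str] = []
--
--     # First pass: identify title and split by ## headings
--     for i, line in enumerate(lines):
--         if i == 0 and line.startswith("# "):
--             title = line.strip()
--             continue
--
--         if line.startswith("## "):
--             # Flush previous section
--             if current_section_name is None:
--                 # This is the first section; everything seen so far is leading text
--                 leading_lines = current_buf
--             else:
--                 sections[current_section_name] = "\n".join(current_buf).strip() + "\n"
--
--             current_section_name = line[3:].strip()
--             current_buf = []
--         else:
--             current_buf.append(line)
--
--     # Flush last section or leading text
--     if current_section_name is None:
--         # No section headings at all
--         leading_lines = current_buf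
--     else:
--         sections[current_section_name] = "\n".join(current_buf).strip() + "\n"
--
--     leading_text = "\n".join(leading_lines).strip() + ("\n" if leading_lines else "")
--
--     return title, sections, leading_text
-- ===== SOURCE B (Python) =====
-- def parse_readme_sections(content):
--     """Back-to-front single pass: scan lines in reverse, accumulating a pending
--     buffer and emitting (name, body) pairs at each '## ' heading."""
--     lines = content.splitlines()
--     has_title = bool(lines) and lines[0].startswith("# ")
--     title = lines[0].strip() if has_title else ""
--     body = lines[1:] if has_title else lines
--
--     pending = []      # lines seen since the last heading, in reverse order
--     rev_secs = []     # (name, text) pairs, last heading first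
--     for line in reversed(body):
--         if line.startswith("## "):
--             text = "\n".join(reversed(pending)).strip() + "\n"
--             rev_secs.append((line[3:].strip(), text))
--             pending = []
--         else:
--             pending.append(line)
--
--     sections = {}
--     for name, text in reversed(rev_secs):
--         sections[name] = text
--
--     leading = pending[::-1]
--     leading_text = "\n".join(leading).strip() + ("\n" if leading else "")
--     return title, sections, leading_text
-- ===== Notes on version B (the rewrite author's own statement) =====
-- stated objective: alternative
-- what changed: B replaces A's forward stateful scan (current-section name + buffer with two flush sites) by a single reverse pass that emits each (name, body) pair the moment its heading is met, then reverses the pair list into the dict; no pending-section state or post-loop flush remains.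
import Mathlib
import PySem

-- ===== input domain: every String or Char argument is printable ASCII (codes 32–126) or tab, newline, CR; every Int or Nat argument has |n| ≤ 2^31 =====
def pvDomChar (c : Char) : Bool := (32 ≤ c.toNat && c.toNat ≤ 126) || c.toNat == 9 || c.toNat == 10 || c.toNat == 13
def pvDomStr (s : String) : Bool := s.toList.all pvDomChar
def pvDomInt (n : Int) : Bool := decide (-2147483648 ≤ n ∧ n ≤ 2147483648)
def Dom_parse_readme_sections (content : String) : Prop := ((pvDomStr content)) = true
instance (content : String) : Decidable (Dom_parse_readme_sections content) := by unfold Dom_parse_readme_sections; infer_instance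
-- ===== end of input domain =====

-- B re-implements the parse as a single reverse scan emitting completed sections at each
-- heading (no current-section state, no post-loop flush); same values, same cost ("alternative").

-- ===== PORT A =====
-- one loop step of A's 'for i, line in enumerate(lines)' (state: title, sections, leading_lines, current_section_name, current_buf)
def pvAStep (st : String × PySem.Dict String String × List String × Option String × List String)
    (il : Int × String) :
    String × PySem.Dict String String × List String × Option String × List String :=
  let (title, sections, leading, cur, buf) := st
  let (i, line) := il
  if i == 0 && PySem.Str.startswith line "# " then
    (PySem.Str.strip line, sections, leading, cur, buf)
  else if PySem.Str.startswith line "## " then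
    let name := PySem.Str.strip (PySem.Str.slice line (some 3) none)
    match cur with
    | none => (title, sections, buf, some name, [])
    | some n =>
        (title, sections.insert n (PySem.Str.strip (PySem.Str.join "\n" buf) ++ "\n"),
         leading, some name, [])
  else (title, sections, leading, cur, buf ++ [line])

def parse_readme_sections (content : String) : String × (List (String × String)) × String :=
  let lines := PySem.Str.splitlines content
  let st := (PySem.List.enumerate lines 0).foldl pvAStep ("", PySem.Dict.empty, [], none, [])
  -- final flush of the last section / leading text
  let fin : String × PySem.Dict String String × List String :=
    match st with
    | (title, sections0, _, none, buf) => (title, sections0, buf)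
    | (title, sections0, leading0, some n, buf) =>
        (title, sections0.insert n (PySem.Str.strip (PySem.Str.join "\n" buf) ++ "\n"), leading0)
  let leading_text := PySem.Str.strip (PySem.Str.join "\n" fin.2.2) ++
    (if fin.2.2.isEmpty then "" else "\n")
  (fin.1, fin.2.1.items, leading_text)

-- ===== PORT B =====
-- one step of B's reverse scan (state: pending lines in reverse order, (name, text) pairs last-first)
def pvBStep (st : List String × List (String × String)) (line : String) :
    List String × List (String × String) :=
  let (pending, revSecs) := st
  if PySem.Str.startswith line "## " then
    let text := PySem.Str.strip (PySem.Str.join "\n" pending.reverse) ++ "\n"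
    ([], revSecs ++ [(PySem.Str.strip (PySem.Str.slice line (some 3) none), text)])
  else (pending ++ [line], revSecs)

def parse_readme_sections_alt (content : String) : String × (List (String × String)) × String :=
  let lines := PySem.Str.splitlines content
  let hasTitle := match lines with
    | [] => false
    | l :: _ => PySem.Str.startswith l "# "
  let title := if hasTitle then PySem.Str.strip (lines.headD "") else ""
  let body := if hasTitle then lines.tail else lines
  let st := body.reverse.foldl pvBStep ([], [])
  let sections := st.2.reverse.foldl
    (fun (d : PySem.Dict String String) p => d.insert p.1 p.2) PySem.Dict.empty
  let leading := st.1.reverse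
  let leading_text := PySem.Str.strip (PySem.Str.join "\n" leading) ++
    (if leading.isEmpty then "" else "\n")
  (title, sections.items, leading_text)

-- ===== PRECONDITION & SPEC =====
def Spec_parse_readme_sections (content : String) (out : String × (List (String × String)) × String) : Prop := out = parse_readme_sections_alt content
instance (content : String) (out : String × (List (String × String)) × String) : Decidable (Spec_parse_readme_sections content out) := by unfold Spec_parse_readme_sections; infer_instance

-- ===== CLAIM (what is proved, stated in full; the proofs are below) =====
def Claim_equal_parse_readme_sections : Prop := ∀ (content : String), Dom_parse_readme_sections content → Spec_parse_readme_sections content (parse_readme_sections content)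

-- ===== LEMMAS AND PROOFS =====

def pvHdr (l : String) : Bool := PySem.Str.startswith l "## "

def pvName (l : String) : String := PySem.Str.strip (PySem.Str.slice l (some 3) none)

def pvBody (b : List String) : String := PySem.Str.strip (PySem.Str.join "\n" b) ++ "\n"

-- reference decomposition: leading lines, then (name, body-lines) per section
def pvSplit : List String → List String × List (String × List String)
  | [] => ([], [])
  | l :: ls =>
    let (le, secs) := pvSplit ls
    if pvHdr l then ([], (pvName l, le) :: secs) else (l :: le, secs)

def pvIns (d : PySem.Dict String String) (p : String × String) : PySem.Dict String String :=
  d.insert p.1 p.2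

def pvPairs (ls : List String) : List (String × String) :=
  (pvSplit ls).2.map (fun p => (p.1, pvBody p.2))

-- A's loop followed by A's final flush (definitionally the tail of port A)
def pvRunA (ls : List String) (s : Int)
    (st : String × PySem.Dict String String × List String × Option String × List String) :
    String × PySem.Dict String String × List String :=
  match (PySem.List.enumerate ls s).foldl pvAStep st with
  | (title, sections0, _, none, buf) => (title, sections0, buf)
  | (title, sections0, leading0, some n, buf) =>
      (title, sections0.insert n (PySem.Str.strip (PySem.Str.join "\n" buf) ++ "\n"), leading0)

theorem pvRunA_some (ls : List String) : ∀ (s : Int) (t : String) (d : PySem.Dict String String)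
    (lead : List String) (n : String) (buf : List String), 1 ≤ s →
    pvRunA ls s (t, d, lead, some n, buf)
      = (t, List.foldl pvIns d ((n, pvBody (buf ++ (pvSplit ls).1)) :: pvPairs ls), lead) := by
  induction ls with
  | nil =>
      intro s t d lead n buf hs
      simp [pvRunA, PySem.List.enumerate_nil, pvIns, pvPairs, pvSplit, pvBody]
  | cons l ls ih =>
      intro s t d lead n buf hs
      have hz : (s == 0) = false := by simp; omega
      by_cases hh : PySem.Chars.startswith l.toList ['#', '#', ' '] = true
      · have step : pvAStep (t, d, lead, some n, buf) (s, l)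
            = (t, d.insert n (pvBody buf), lead, some (pvName l), []) := by
          simp [pvAStep, hz, hh, pvName, pvBody]
        have key := ih (s + 1) t (d.insert n (pvBody buf)) lead (pvName l) [] (by omega)
        simp only [pvRunA] at key ⊢
        rw [PySem.List.enumerate_cons, List.foldl_cons, step, key]
        simp [pvSplit, pvPairs, pvHdr, hh, pvIns, pvBody]
      · have hh' : PySem.Chars.startswith l.toList ['#', '#', ' '] = false := by simpa using hh
        have step : pvAStep (t, d, lead, some n, buf) (s, l)
            = (t, d, lead, some n, buf ++ [l]) := by
          simp [pvAStep, hz, hh']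
        have key := ih (s + 1) t d lead n (buf ++ [l]) (by omega)
        simp only [pvRunA] at key ⊢
        rw [PySem.List.enumerate_cons, List.foldl_cons, step, key]
        simp [pvSplit, pvPairs, pvHdr, hh']

theorem pvRunA_none (ls : List String) : ∀ (s : Int) (t : String) (d : PySem.Dict String String)
    (lead : List String) (buf : List String), 1 ≤ s →
    pvRunA ls s (t, d, lead, none, buf)
      = (t, List.foldl pvIns d (pvPairs ls), buf ++ (pvSplit ls).1) := by
  induction ls with
  | nil =>
      intro s t d lead buf hs
      simp [pvRunA, PySem.List.enumerate_nil, pvPairs, pvSplit]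
  | cons l ls ih =>
      intro s t d lead buf hs
      have hz : (s == 0) = false := by simp; omega
      by_cases hh : PySem.Chars.startswith l.toList ['#', '#', ' '] = true
      · have step : pvAStep (t, d, lead, none, buf) (s, l)
            = (t, d, buf, some (pvName l), []) := by
          simp [pvAStep, hz, hh, pvName]
        have key := pvRunA_some ls (s + 1) t d buf (pvName l) [] (by omega)
        simp only [pvRunA] at key ⊢
        rw [PySem.List.enumerate_cons, List.foldl_cons, step, key]
        simp [pvSplit, pvPairs, pvHdr, hh, pvIns]
      · have hh' : PySem.Chars.startswith l.toList ['#', '#', ' '] = false := by simpa using hh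
        have step : pvAStep (t, d, lead, none, buf) (s, l)
            = (t, d, lead, none, buf ++ [l]) := by
          simp [pvAStep, hz, hh']
        have key := ih (s + 1) t d lead (buf ++ [l]) (by omega)
        simp only [pvRunA] at key ⊢
        rw [PySem.List.enumerate_cons, List.foldl_cons, step, key]
        simp [pvSplit, pvPairs, pvHdr, hh']

theorem pvSplit_no_hdr (xs : List String) (h : ∀ l ∈ xs, pvHdr l = false) :
    pvSplit xs = (xs, []) := by
  induction xs with
  | nil => simp [pvSplit]
  | cons x xs ih =>
      have hx := h x (List.mem_cons_self ..)
      have := ih (fun l hl => h l (List.mem_cons_of_mem _ hl))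
      simp [pvSplit, this, hx]

theorem pvBfold (ls : List String) (p : List String) (rs : List (String × String))
    (hp : ∀ l ∈ p, pvHdr l = false) :
    ls.foldr (fun l st => pvBStep st l) (p, rs)
      = ((pvSplit (ls ++ p.reverse)).1.reverse,
         rs ++ ((pvSplit (ls ++ p.reverse)).2.map (fun q => (q.1, pvBody q.2))).reverse) := by
  induction ls with
  | nil =>
      have : pvSplit p.reverse = (p.reverse, []) := by
        apply pvSplit_no_hdr
        intro l hl
        exact hp l (by simpa using hl)
      simp [this]
  | cons l ls ih =>
      simp only [List.foldr_cons, ih]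
      by_cases hh : PySem.Chars.startswith l.toList ['#', '#', ' '] = true
      · simp [pvBStep, hh, pvSplit, pvHdr, pvName, pvBody]
      · have hh' : PySem.Chars.startswith l.toList ['#', '#', ' '] = false := by simpa using hh
        simp [pvBStep, hh', pvSplit, pvHdr]

-- B's fold over the reversed body, characterised by pvSplit
theorem pvBfold_main (body : List String) :
    body.reverse.foldl pvBStep ([], [])
      = ((pvSplit body).1.reverse, ((pvSplit body).2.map (fun q => (q.1, pvBody q.2))).reverse) := by
  rw [List.foldl_reverse]
  simpa using pvBfold body [] [] (by simp)

-- B, rewritten through the pvSplit characterisation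
theorem pvB_eq (content : String) :
    parse_readme_sections_alt content =
      (let lines := PySem.Str.splitlines content
       let hasTitle := match lines with
         | [] => false
         | l :: _ => PySem.Str.startswith l "# "
       let title := if hasTitle then PySem.Str.strip (lines.headD "") else ""
       let body := if hasTitle then lines.tail else lines
       ((title, (List.foldl pvIns PySem.Dict.empty (pvPairs body)).items,
         PySem.Str.strip (PySem.Str.join "\n" (pvSplit body).1) ++
           (if (pvSplit body).1.isEmpty then "" else "\n")) :
         String × (List (String × String)) × String)) := by
  simp only [parse_readme_sections_alt, pvBfold_main, List.reverse_reverse, pvPairs]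
  rfl

theorem parse_readme_sections_spec' (content : String) :
    parse_readme_sections content = parse_readme_sections_alt content := by
  rw [pvB_eq]
  show (let fin := pvRunA (PySem.Str.splitlines content) 0 ("", PySem.Dict.empty, [], none, [])
        (fin.1, fin.2.1.items,
         PySem.Str.strip (PySem.Str.join "\n" fin.2.2) ++ (if fin.2.2.isEmpty then "" else "\n"))) = _
  cases hl : PySem.Str.splitlines content with
  | nil => simp [pvRunA, PySem.List.enumerate_nil, pvPairs, pvSplit]
  | cons l0 rest =>
      by_cases ht : PySem.Chars.startswith l0.toList ['#', ' '] = true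
      · -- title line: A skips it via the i == 0 branch; B drops it via lines[1:]
        have step : pvAStep ("", PySem.Dict.empty, [], none, []) ((0 : Int), l0)
            = (PySem.Str.strip l0, PySem.Dict.empty, [], none, []) := by
          simp [pvAStep, ht]
        have expand : pvRunA (l0 :: rest) 0 ("", PySem.Dict.empty, [], none, [])
            = pvRunA rest 1 (PySem.Str.strip l0, PySem.Dict.empty, [], none, []) := by
          simp only [pvRunA, PySem.List.enumerate_cons, List.foldl_cons, step, zero_add]
        have key := pvRunA_none rest 1 (PySem.Str.strip l0) PySem.Dict.empty [] [] (by omega)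
        simp only [expand, key]
        simp [ht]
      · have ht' : PySem.Chars.startswith l0.toList ['#', ' '] = false := by simpa using ht
        by_cases hh : PySem.Chars.startswith l0.toList ['#', '#', ' '] = true
        · have step : pvAStep ("", PySem.Dict.empty, [], none, []) ((0 : Int), l0)
              = ("", PySem.Dict.empty, [], some (pvName l0), []) := by
            simp [pvAStep, ht', hh, pvName]
          have expand : pvRunA (l0 :: rest) 0 ("", PySem.Dict.empty, [], none, [])
              = pvRunA rest 1 ("", PySem.Dict.empty, [], some (pvName l0), []) := by
            simp only [pvRunA, PySem.List.enumerate_cons, List.foldl_cons, step, zero_add]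
          have key := pvRunA_some rest 1 "" PySem.Dict.empty [] (pvName l0) [] (by omega)
          simp only [expand, key]
          simp [ht', pvSplit, pvHdr, hh, pvPairs, pvIns, pvName, pvBody]
        · have hh' : PySem.Chars.startswith l0.toList ['#', '#', ' '] = false := by simpa using hh
          have step : pvAStep ("", PySem.Dict.empty, [], none, []) ((0 : Int), l0)
              = ("", PySem.Dict.empty, [], none, [l0]) := by
            simp [pvAStep, ht', hh']
          have expand : pvRunA (l0 :: rest) 0 ("", PySem.Dict.empty, [], none, [])
              = pvRunA rest 1 ("", PySem.Dict.empty, [], none, [l0]) := by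
            simp only [pvRunA, PySem.List.enumerate_cons, List.foldl_cons, step, zero_add]
          have key := pvRunA_none rest 1 "" PySem.Dict.empty [] [l0] (by omega)
          have hsplit : pvSplit (l0 :: rest) = (l0 :: (pvSplit rest).1, (pvSplit rest).2) := by
            simp [pvSplit, pvHdr, hh']
          simp only [expand, key]
          simp [ht', pvPairs, hsplit]

-- ===== VERDICT (by name: the statement is the Claim_ definition above) =====
theorem parse_readme_sections_spec : Claim_equal_parse_readme_sections := by
  intro content _
  exact parse_readme_sections_spec' content
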